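-- pv_equiv track=rewrite | github.com/SWeszler/google-kickstart | 2021_A/A2/a2.py | solution_optimal
-- ===== SOURCE A (Python) =====
-- def solution_optimal(R, C, m):
--     top = [[c for c in r] for r in m]
--     right = [[c for c in r] for r in m]
--     bottom = [[c for c in r] for r in m]
--     left = [[c for c in r] for r in m]
--     res = 0
--
--     for i in range(R):
--         for j in range(C):
--             if m[i][j] == 0:
--                 continue
--             if i > 0:
--                 top[i][j] += top[i - 1][j]
--             if j > 0:
--                 left[i][j] += left[i][j - 1]
--
--     for i in range(R - 1, -1, -1):
--         for j in range(C - 1, -1, -1):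
--             if m[i][j] == 0:
--                 continue
--             if i < R - 1:
--                 bottom[i][j] += bottom[i + 1][j]
--             if j < C - 1:
--                 right[i][j] += right[i][j + 1]
--
--     def count(x, y):
--         res = min(x // 2, y) + min(y // 2, x) - 2
--         return res if res > 0 else 0
--
--     for i in range(R):
--         for j in range(C):
--             if m[i][j] == 0:
--                 continue
--             res += count(top[i][j], left[i][j])
--             res += count(top[i][j], right[i][j])
--             res += count(bottom[i][j], left[i][j])
--             res += count(bottom[i][j], right[i][j])
--
--     return res
-- ===== SOURCE B (Python) =====
-- def solution_optimal(R, C, m):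
--     # Single pass with local outward scans instead of four prefix-sum matrices.
--     def count(x, y):
--         v = min(x // 2, y) + min(y // 2, x) - 2
--         return v if v > 0 else 0
--
--     res = 0
--     for i in range(R):
--         for j in range(C):
--             if m[i][j] == 0:
--                 continue
--             up = 0
--             k = i
--             while k >= 0 and m[k][j] != 0:
--                 up += m[k][j]
--                 k -= 1
--             down = 0
--             k = i
--             while k < R and m[k][j] != 0:
--                 down += m[k][j]
--                 k += 1
--             row = m[i]
--             left = 0
--             k = j
--             while k >= 0 and row[k] != 0:
--                 left += row[k]
--                 k -= 1
--             right = 0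
--             k = j
--             while k < C and row[k] != 0:
--                 right += row[k]
--                 k += 1
--             res += count(up, left)
--             res += count(up, right)
--             res += count(down, left)
--             res += count(down, right)
--     return res
-- ===== Notes on version B (the rewrite author's own statement) =====
-- stated objective: simpler
-- what changed: Replaces the four prefix-sum matrices built by three full grid passes with a single pass that, at each nonzero cell, computes the four arm sums directly by scanning outward, keeping the same count formula.
import Mathlib
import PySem

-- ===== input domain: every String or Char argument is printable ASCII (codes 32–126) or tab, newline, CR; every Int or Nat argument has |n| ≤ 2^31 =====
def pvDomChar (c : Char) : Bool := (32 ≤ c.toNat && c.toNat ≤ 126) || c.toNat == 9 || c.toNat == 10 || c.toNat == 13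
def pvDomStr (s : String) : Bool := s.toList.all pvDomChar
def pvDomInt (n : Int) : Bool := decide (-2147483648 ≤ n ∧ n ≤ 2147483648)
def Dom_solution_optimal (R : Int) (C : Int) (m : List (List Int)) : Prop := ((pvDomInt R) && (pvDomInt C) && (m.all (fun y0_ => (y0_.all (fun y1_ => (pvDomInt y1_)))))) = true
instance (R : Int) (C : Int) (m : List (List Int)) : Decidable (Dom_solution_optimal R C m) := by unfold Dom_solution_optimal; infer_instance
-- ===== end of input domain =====

-- B replaces A's four prefix-sum matrices (three grid passes) by a single pass that scans
-- outward from each nonzero cell to get the four arm sums; same count formula (objective: simpler).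

-- ===== PORT A =====
-- m[i][j] (read): exact under Pre_ (loop indices are in range there)
def mget (g : List (List Int)) (i j : Int) : Int :=
  PySem.List.pyGetD (PySem.List.pyGetD g i []) j 0

-- g[i][j] = v (write): exact under Pre_ (loop indices are in range there)
def mset (g : List (List Int)) (i j : Int) (v : Int) : List (List Int) :=
  PySem.List.pySetD g i (PySem.List.pySetD (PySem.List.pyGetD g i []) j v)

-- A's inner helper `count`
def countA (x y : Int) : Int :=
  let r := min (PySem.Int.floordiv x 2) y + min (PySem.Int.floordiv y 2) x - 2
  if r > 0 then r else 0

-- first pass body: top/left updates at cell (i, j)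
def body1 (m : List (List Int)) (i : Int)
    (tl : List (List Int) × List (List Int)) (j : Int) :
    List (List Int) × List (List Int) :=
  if mget m i j = 0 then tl
  else
    let t := if i > 0 then mset tl.1 i j (mget tl.1 i j + mget tl.1 (i - 1) j) else tl.1
    let l := if j > 0 then mset tl.2 i j (mget tl.2 i j + mget tl.2 i (j - 1)) else tl.2
    (t, l)

def row1 (m : List (List Int)) (C : Int)
    (tl : List (List Int) × List (List Int)) (i : Int) :
    List (List Int) × List (List Int) :=
  (PySem.List.pyRange 0 C 1).foldl (body1 m i) tl

-- second pass body: bottom/right updates at cell (i, j)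
def body2 (m : List (List Int)) (R C : Int) (i : Int)
    (br : List (List Int) × List (List Int)) (j : Int) :
    List (List Int) × List (List Int) :=
  if mget m i j = 0 then br
  else
    let b := if i < R - 1 then mset br.1 i j (mget br.1 i j + mget br.1 (i + 1) j) else br.1
    let r := if j < C - 1 then mset br.2 i j (mget br.2 i j + mget br.2 i (j + 1)) else br.2
    (b, r)

def row2 (m : List (List Int)) (R C : Int)
    (br : List (List Int) × List (List Int)) (i : Int) :
    List (List Int) × List (List Int) :=
  (PySem.List.pyRange (C - 1) (-1) (-1)).foldl (body2 m R C i) br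

-- third pass body: accumulate the four count terms at cell (i, j)
def body3 (m top left bottom right : List (List Int)) (i : Int) (res : Int) (j : Int) : Int :=
  if mget m i j = 0 then res
  else res + countA (mget top i j) (mget left i j)
           + countA (mget top i j) (mget right i j)
           + countA (mget bottom i j) (mget left i j)
           + countA (mget bottom i j) (mget right i j)

def row3 (m top left bottom right : List (List Int)) (C : Int) (res : Int) (i : Int) : Int :=
  (PySem.List.pyRange 0 C 1).foldl (body3 m top left bottom right i) res

def solution_optimal (R : Int) (C : Int) (m : List (List Int)) : Int :=
  let top := m.map (fun r => r.map (fun c => c))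
  let right := m.map (fun r => r.map (fun c => c))
  let bottom := m.map (fun r => r.map (fun c => c))
  let left := m.map (fun r => r.map (fun c => c))
  let tl := (PySem.List.pyRange 0 R 1).foldl (row1 m C) (top, left)
  let br := (PySem.List.pyRange (R - 1) (-1) (-1)).foldl (row2 m R C) (bottom, right)
  (PySem.List.pyRange 0 R 1).foldl (row3 m tl.1 tl.2 br.1 br.2 C) 0

-- ===== PORT B =====
-- while k >= 0 and m[k][j] != 0: s += m[k][j]; k -= 1   (fuel = k+1, so fuel > 0 ↔ k ≥ 0)
def walkUp (m : List (List Int)) (j : Int) : Nat → Int → Int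
  | 0, _ => 0
  | f + 1, i => if mget m i j = 0 then 0 else mget m i j + walkUp m j f (i - 1)

-- while k < R and m[k][j] != 0: s += m[k][j]; k += 1   (fuel = R-k, so fuel > 0 ↔ k < R)
def walkDown (m : List (List Int)) (j : Int) : Nat → Int → Int
  | 0, _ => 0
  | f + 1, i => if mget m i j = 0 then 0 else mget m i j + walkDown m j f (i + 1)

-- row[k] (read): exact under Pre_
def rget (row : List Int) (k : Int) : Int := PySem.List.pyGetD row k 0

-- while k >= 0 and row[k] != 0: s += row[k]; k -= 1
def walkLeft (row : List Int) : Nat → Int → Int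
  | 0, _ => 0
  | f + 1, k => if rget row k = 0 then 0 else rget row k + walkLeft row f (k - 1)

-- while k < C and row[k] != 0: s += row[k]; k += 1
def walkRight (row : List Int) : Nat → Int → Int
  | 0, _ => 0
  | f + 1, k => if rget row k = 0 then 0 else rget row k + walkRight row f (k + 1)

def bodyB (R C : Int) (m : List (List Int)) (i : Int) (res : Int) (j : Int) : Int :=
  if mget m i j = 0 then res
  else
    let up := walkUp m j (i + 1).toNat i
    let down := walkDown m j (R - i).toNat i
    let row := PySem.List.pyGetD m i []
    let left := walkLeft row (j + 1).toNat j
    let right := walkRight row (C - j).toNat j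
    res + countA up left + countA up right + countA down left + countA down right

def rowB (R C : Int) (m : List (List Int)) (res : Int) (i : Int) : Int :=
  (PySem.List.pyRange 0 C 1).foldl (bodyB R C m i) res

def solution_optimal_alt (R : Int) (C : Int) (m : List (List Int)) : Int :=
  (PySem.List.pyRange 0 R 1).foldl (rowB R C m) 0

-- ===== PRECONDITION & SPEC =====
-- Pre_ excludes exactly the inputs where A raises IndexError: when both loop ranges are
-- nonempty, m must have at least R rows and each of the first R rows at least C entries.
def Pre_solution_optimal (R : Int) (C : Int) (m : List (List Int)) : Prop :=
  R ≤ 0 ∨ C ≤ 0 ∨ (R ≤ (m.length : Int) ∧ ∀ row ∈ m.take R.toNat, C ≤ (row.length : Int))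
instance (R : Int) (C : Int) (m : List (List Int)) : Decidable (Pre_solution_optimal R C m) := by
  unfold Pre_solution_optimal; infer_instance

def pvWitness_solution_optimal : Int × Int × List (List Int) := (2, 2, [[1, 1], [1, 0]])

def Spec_solution_optimal (R : Int) (C : Int) (m : List (List Int)) (out : Int) : Prop := out = solution_optimal_alt R C m
instance (R : Int) (C : Int) (m : List (List Int)) (out : Int) : Decidable (Spec_solution_optimal R C m out) := by unfold Spec_solution_optimal; infer_instance

-- ===== CLAIM (what is proved, stated in full; the proofs are below) =====
def Claim_equal_solution_optimal : Prop := ∀ (R : Int) (C : Int) (m : List (List Int)), Dom_solution_optimal R C m → Pre_solution_optimal R C m → Spec_solution_optimal R C m (solution_optimal R C m)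

-- ===== LEMMAS AND PROOFS =====

-- proof-side views of mget/mset at Nat indices
def gN (g : List (List Int)) (a b : Nat) : Int := (g.getD a []).getD b 0
def setN (g : List (List Int)) (a b : Nat) (v : Int) : List (List Int) :=
  g.set a ((g.getD a []).set b v)

lemma mget_nat (g : List (List Int)) (a b : Nat) : mget g (a : Int) (b : Int) = gN g a b := by
  simp [mget, gN]

lemma mset_nat (g : List (List Int)) (a b : Nat) (v : Int) :
    mset g (a : Int) (b : Int) v = setN g a b v := by
  simp [mset, setN]

lemma rget_nat (m : List (List Int)) (a b : Nat) :
    rget (m.getD a []) (b : Int) = gN m a b := by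
  simp [rget, gN]

lemma gN_setN_self (g : List (List Int)) (a b : Nat) (v : Int)
    (ha : a < g.length) (hb : b < (g.getD a []).length) :
    gN (setN g a b v) a b = v := by
  simp only [gN, setN, List.getD_eq_getElem?_getD, List.getElem?_set]
  simp only [if_pos ha]
  rw [if_pos]
  simp only [List.getD_eq_getElem?_getD] at hb
  cases hx : g[a]? with
  | none => simp at hx; omega
  | some row => simp_all
  · simp_all [List.getD_eq_getElem?_getD]

lemma gN_setN_ne (g : List (List Int)) (a b a' b' : Nat) (v : Int)
    (h : a' ≠ a ∨ b' ≠ b) :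
    gN (setN g a b v) a' b' = gN g a' b' := by
  simp only [gN, setN, List.getD_eq_getElem?_getD, List.getElem?_set]
  by_cases haa : a = a'
  · subst haa
    have hb : b' ≠ b := by tauto
    by_cases hlt : a < g.length
    · simp [hlt]
      rw [List.getElem?_set_ne (Ne.symm hb)]
    · have hnone : g[a]? = none := by simp; omega
      simp [hlt]
  · simp [if_neg haa]

lemma map_length_setN (g : List (List Int)) (a b : Nat) (v : Int) :
    (setN g a b v).map List.length = g.map List.length := by
  unfold setN
  rw [List.map_set]
  by_cases hlt : a < g.length
  · have hlen : ((g.getD a []).set b v).length = (g.map List.length).getD a 0 := by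
      simp [List.getD_eq_getElem?_getD, List.getElem?_eq_getElem hlt]
    rw [hlen, List.getD_eq_getElem?_getD, List.getElem?_eq_getElem (by simpa using hlt),
      Option.getD_some, List.set_getElem_self]
  · rw [List.set_eq_of_length_le (by simpa using Nat.le_of_not_lt hlt)]

lemma rowlen_eq {g m : List (List Int)} (h : g.map List.length = m.map List.length) (a : Nat) :
    (g.getD a []).length = (m.getD a []).length := by
  have h2 := congrArg (fun l => l[a]?) h
  simp only [List.getElem?_map] at h2
  cases hx : g[a]? <;> cases hy : m[a]? <;> simp_all [List.getD_eq_getElem?_getD]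

lemma glen_eq {g m : List (List Int)} (h : g.map List.length = m.map List.length) :
    g.length = m.length := by
  have := congrArg List.length h; simpa using this

-- the arm-sum specifications (the values B's outward scans produce at in-range cells)
def U (m : List (List Int)) (a b : Nat) : Int := walkUp m (b : Int) (a + 1) (a : Int)
def Dn (m : List (List Int)) (Rn a b : Nat) : Int := walkDown m (b : Int) (Rn - a) (a : Int)
def Lf (m : List (List Int)) (a b : Nat) : Int := walkLeft (m.getD a []) (b + 1) (b : Int)
def Rt (m : List (List Int)) (Cn a b : Nat) : Int := walkRight (m.getD a []) (Cn - b) (b : Int)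

lemma U_of_zero (m : List (List Int)) (r b : Nat) (h0 : gN m r b = 0) :
    U m r b = gN m r b := by
  simp only [U, walkUp]
  rw [mget_nat, if_pos h0, h0]

lemma U_zero_row (m : List (List Int)) (b : Nat) (h0 : gN m 0 b ≠ 0) :
    U m 0 b = gN m 0 b := by
  simp only [U, walkUp]
  rw [mget_nat, if_neg h0]
  simp

lemma U_succ (m : List (List Int)) (r b : Nat) (h0 : gN m (r + 1) b ≠ 0) :
    U m (r + 1) b = gN m (r + 1) b + U m r b := by
  have hc : ((r + 1 : Nat) : Int) - 1 = (r : Int) := by push_cast; ring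
  simp only [U, walkUp]
  rw [mget_nat, if_neg h0, hc]

lemma Lf_of_zero (m : List (List Int)) (a b : Nat) (h0 : gN m a b = 0) :
    Lf m a b = gN m a b := by
  simp only [Lf, walkLeft]
  rw [rget_nat, if_pos h0, h0]

lemma Lf_zero_col (m : List (List Int)) (a : Nat) (h0 : gN m a 0 ≠ 0) :
    Lf m a 0 = gN m a 0 := by
  simp only [Lf, walkLeft]
  rw [rget_nat, if_neg h0]
  simp

lemma Lf_succ (m : List (List Int)) (a b : Nat) (h0 : gN m a (b + 1) ≠ 0) :
    Lf m a (b + 1) = gN m a (b + 1) + Lf m a b := by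
  have hc : ((b + 1 : Nat) : Int) - 1 = (b : Int) := by push_cast; ring
  simp only [Lf, walkLeft]
  rw [rget_nat, if_neg h0, hc]

lemma Dn_of_zero (m : List (List Int)) (Rn a b : Nat) (ha : a < Rn) (h0 : gN m a b = 0) :
    Dn m Rn a b = gN m a b := by
  obtain ⟨k, hk⟩ : ∃ k, Rn - a = k + 1 := ⟨Rn - a - 1, by omega⟩
  simp only [Dn, hk, walkDown]
  rw [mget_nat, if_pos h0, h0]

lemma Dn_last (m : List (List Int)) (Rn a b : Nat) (ha : a + 1 = Rn) :
    Dn m Rn a b = gN m a b := by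
  have hk : Rn - a = 1 := by omega
  simp only [Dn, hk, walkDown]
  rw [mget_nat]
  by_cases h0 : gN m a b = 0
  · rw [if_pos h0, h0]
  · rw [if_neg h0]
    simp

lemma Dn_succ (m : List (List Int)) (Rn a b : Nat) (ha : a + 1 < Rn) (h0 : gN m a b ≠ 0) :
    Dn m Rn a b = gN m a b + Dn m Rn (a + 1) b := by
  obtain ⟨k, hk⟩ : ∃ k, Rn - a = k + 1 := ⟨Rn - a - 1, by omega⟩
  have hk2 : Rn - (a + 1) = k := by omega
  have hc : (a : Int) + 1 = ((a + 1 : Nat) : Int) := by push_cast; ring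
  simp only [Dn, hk, walkDown]
  rw [mget_nat, if_neg h0, hc, hk2]

lemma Rt_of_zero (m : List (List Int)) (Cn a b : Nat) (hb : b < Cn) (h0 : gN m a b = 0) :
    Rt m Cn a b = gN m a b := by
  obtain ⟨k, hk⟩ : ∃ k, Cn - b = k + 1 := ⟨Cn - b - 1, by omega⟩
  simp only [Rt, hk, walkRight]
  rw [rget_nat, if_pos h0, h0]

lemma Rt_last (m : List (List Int)) (Cn a b : Nat) (hb : b + 1 = Cn) :
    Rt m Cn a b = gN m a b := by
  have hk : Cn - b = 1 := by omega
  simp only [Rt, hk, walkRight]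
  rw [rget_nat]
  by_cases h0 : gN m a b = 0
  · rw [if_pos h0, h0]
  · rw [if_neg h0]
    simp

lemma Rt_succ (m : List (List Int)) (Cn a b : Nat) (hb : b + 1 < Cn) (h0 : gN m a b ≠ 0) :
    Rt m Cn a b = gN m a b + Rt m Cn a (b + 1) := by
  obtain ⟨k, hk⟩ : ∃ k, Cn - b = k + 1 := ⟨Cn - b - 1, by omega⟩
  have hk2 : Cn - (b + 1) = k := by omega
  have hc : (b : Int) + 1 = ((b + 1 : Nat) : Int) := by push_cast; ring
  simp only [Rt, hk, walkRight]
  rw [rget_nat, if_neg h0, hc, hk2]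

-- per-grid loop invariant: cells where P holds carry the final arm value F,
-- the other in-range cells still carry the original entry
def Comp (m : List (List Int)) (Rn Cn : Nat) (F : Nat → Nat → Int)
    (P : Nat → Nat → Prop) (g : List (List Int)) : Prop :=
  g.map List.length = m.map List.length ∧
  ∀ a b, a < Rn → b < Cn →
    (P a b → gN g a b = F a b) ∧ (¬ P a b → gN g a b = gN m a b)

lemma Comp_mono {m Rn Cn F} {P Q : Nat → Nat → Prop} {g}
    (hPQ : ∀ a b, a < Rn → b < Cn → (Q a b ↔ P a b))
    (h : Comp m Rn Cn F P g) : Comp m Rn Cn F Q g := by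
  obtain ⟨h1, h2⟩ := h
  refine ⟨h1, fun a b ha hb => ?_⟩
  obtain ⟨x1, x2⟩ := h2 a b ha hb
  exact ⟨fun q => x1 ((hPQ a b ha hb).mp q), fun q => x2 (fun p => q ((hPQ a b ha hb).mpr p))⟩

-- one update step: either the cell already carries its final value (no write),
-- or it is overwritten with its final value
lemma Comp_step {m : List (List Int)} {Rn Cn : Nat} {F : Nat → Nat → Int}
    {P Q : Nat → Nat → Prop} {r j0 : Nat} {g g' : List (List Int)}
    (hr : r < Rn) (hj : j0 < Cn)
    (hRm : Rn ≤ m.length) (hCr : Cn ≤ (m.getD r []).length)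
    (hPQ : ∀ a b, a < Rn → b < Cn → (Q a b ↔ (P a b ∨ (a = r ∧ b = j0))))
    (h : Comp m Rn Cn F P g)
    (hcase : (g' = g ∧ gN g r j0 = F r j0) ∨ g' = setN g r j0 (F r j0)) :
    Comp m Rn Cn F Q g' := by
  obtain ⟨hs, hv⟩ := h
  rcases hcase with ⟨rfl, hv0⟩ | rfl
  · refine ⟨hs, fun a b ha hb => ?_⟩
    obtain ⟨x1, x2⟩ := hv a b ha hb
    constructor
    · intro hq
      rcases (hPQ a b ha hb).mp hq with hp | ⟨rfl, rfl⟩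
      · exact x1 hp
      · exact hv0
    · intro hq
      exact x2 (fun p => hq ((hPQ a b ha hb).mpr (Or.inl p)))
  · refine ⟨by rw [map_length_setN]; exact hs, fun a b ha hb => ?_⟩
    obtain ⟨x1, x2⟩ := hv a b ha hb
    by_cases heq : a = r ∧ b = j0
    · obtain ⟨rfl, rfl⟩ := heq
      have hsets : gN (setN g a b (F a b)) a b = F a b := by
        apply gN_setN_self
        · rw [glen_eq hs]; omega
        · rw [rowlen_eq hs]; omega
      constructor
      · intro _; exact hsets
      · intro hq; exact absurd ((hPQ a b ha hb).mpr (Or.inr ⟨rfl, rfl⟩)) hq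
    · have hne : a ≠ r ∨ b ≠ j0 := by tauto
      have hgn : gN (setN g r j0 (F r j0)) a b = gN g a b := gN_setN_ne _ _ _ _ _ _ hne
      rw [hgn]
      constructor
      · intro hq
        rcases (hPQ a b ha hb).mp hq with hp | hp
        · exact x1 hp
        · exact absurd hp heq
      · intro hq
        exact x2 (fun p => hq ((hPQ a b ha hb).mpr (Or.inl p)))

-- processed-cell predicates: pass 1 runs row-major ascending, pass 2 descending
def P1 (r j0 a b : Nat) : Prop := a < r ∨ (a = r ∧ b < j0)
def P2 (r j0 a b : Nat) : Prop := r < a ∨ (a = r ∧ j0 ≤ b)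

lemma step1 (m : List (List Int)) (Rn Cn : Nat)
    (hRm : Rn ≤ m.length) (hC : ∀ a, a < Rn → Cn ≤ (m.getD a []).length)
    (r j0 : Nat) (hr : r < Rn) (hj : j0 < Cn)
    (tl : List (List Int) × List (List Int))
    (h1 : Comp m Rn Cn (U m) (P1 r j0) tl.1)
    (h2 : Comp m Rn Cn (Lf m) (P1 r j0) tl.2) :
    Comp m Rn Cn (U m) (P1 r (j0 + 1)) (body1 m (r : Int) tl (j0 : Int)).1 ∧
    Comp m Rn Cn (Lf m) (P1 r (j0 + 1)) (body1 m (r : Int) tl (j0 : Int)).2 := by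
  have hPQ : ∀ a b, a < Rn → b < Cn →
      (P1 r (j0 + 1) a b ↔ (P1 r j0 a b ∨ (a = r ∧ b = j0))) := by
    intro a b _ _; unfold P1; omega
  have hP0 : ¬ P1 r j0 r j0 := by unfold P1; omega
  have hCr := hC r hr
  rw [body1, mget_nat]
  by_cases h0 : gN m r j0 = 0
  · rw [if_pos h0]
    constructor
    · exact Comp_step hr hj hRm hCr hPQ h1
        (Or.inl ⟨rfl, by rw [(h1.2 r j0 hr hj).2 hP0, U_of_zero m r j0 h0]⟩)
    · exact Comp_step hr hj hRm hCr hPQ h2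
        (Or.inl ⟨rfl, by rw [(h2.2 r j0 hr hj).2 hP0, Lf_of_zero m r j0 h0]⟩)
  · rw [if_neg h0]
    constructor
    · -- top component
      cases r with
      | zero =>
        have : ¬ ((0 : Int) > 0) := by omega
        simp only [Nat.cast_zero, if_neg this]
        exact Comp_step hr hj hRm hCr hPQ h1
          (Or.inl ⟨rfl, by
            rw [(h1.2 0 j0 hr hj).2 hP0, U_zero_row m j0 h0]⟩)
      | succ r' =>
        have hpos : ((r' + 1 : Nat) : Int) > 0 := by push_cast; omega
        simp only [if_pos hpos]
        have hc : ((r' + 1 : Nat) : Int) - 1 = ((r' : Nat) : Int) := by push_cast; ring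
        rw [hc, mset_nat, mget_nat, mget_nat]
        have hval : gN tl.1 (r' + 1) j0 + gN tl.1 r' j0 = U m (r' + 1) j0 := by
          rw [(h1.2 (r' + 1) j0 hr hj).2 hP0,
            (h1.2 r' j0 (by omega) hj).1 (by unfold P1; omega),
            U_succ m r' j0 h0]
        rw [hval]
        exact Comp_step hr hj hRm hCr hPQ h1 (Or.inr rfl)
    · -- left component
      cases j0 with
      | zero =>
        have : ¬ ((0 : Int) > 0) := by omega
        simp only [Nat.cast_zero, if_neg this]
        exact Comp_step hr hj hRm hCr hPQ h2
          (Or.inl ⟨rfl, by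
            rw [(h2.2 r 0 hr hj).2 hP0, Lf_zero_col m r h0]⟩)
      | succ b' =>
        have hpos : ((b' + 1 : Nat) : Int) > 0 := by push_cast; omega
        simp only [if_pos hpos]
        have hc : ((b' + 1 : Nat) : Int) - 1 = ((b' : Nat) : Int) := by push_cast; ring
        rw [hc, mset_nat, mget_nat, mget_nat]
        have hval : gN tl.2 r (b' + 1) + gN tl.2 r b' = Lf m r (b' + 1) := by
          rw [(h2.2 r (b' + 1) hr hj).2 hP0,
            (h2.2 r b' hr (by omega)).1 (by unfold P1; omega),
            Lf_succ m r b' h0]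
        rw [hval]
        exact Comp_step hr hj hRm hCr hPQ h2 (Or.inr rfl)

lemma step2 (m : List (List Int)) (R C : Int) (Rn Cn : Nat)
    (hRv : R = (Rn : Int)) (hCv : C = (Cn : Int))
    (hRm : Rn ≤ m.length) (hC : ∀ a, a < Rn → Cn ≤ (m.getD a []).length)
    (r j0 : Nat) (hr : r < Rn) (hj : j0 < Cn)
    (br : List (List Int) × List (List Int))
    (h1 : Comp m Rn Cn (Dn m Rn) (P2 r (j0 + 1)) br.1)
    (h2 : Comp m Rn Cn (Rt m Cn) (P2 r (j0 + 1)) br.2) :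
    Comp m Rn Cn (Dn m Rn) (P2 r j0) (body2 m R C (r : Int) br (j0 : Int)).1 ∧
    Comp m Rn Cn (Rt m Cn) (P2 r j0) (body2 m R C (r : Int) br (j0 : Int)).2 := by
  have hPQ : ∀ a b, a < Rn → b < Cn →
      (P2 r j0 a b ↔ (P2 r (j0 + 1) a b ∨ (a = r ∧ b = j0))) := by
    intro a b _ _; unfold P2; omega
  have hP0 : ¬ P2 r (j0 + 1) r j0 := by unfold P2; omega
  have hCr := hC r hr
  rw [body2, mget_nat]
  by_cases h0 : gN m r j0 = 0
  · rw [if_pos h0]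
    constructor
    · exact Comp_step hr hj hRm hCr hPQ h1
        (Or.inl ⟨rfl, by rw [(h1.2 r j0 hr hj).2 hP0, Dn_of_zero m Rn r j0 hr h0]⟩)
    · exact Comp_step hr hj hRm hCr hPQ h2
        (Or.inl ⟨rfl, by rw [(h2.2 r j0 hr hj).2 hP0, Rt_of_zero m Cn r j0 hj h0]⟩)
  · rw [if_neg h0]
    constructor
    · -- bottom component
      by_cases hlast : r + 1 = Rn
      · have : ¬ ((r : Int) < R - 1) := by rw [hRv]; omega
        simp only [if_neg this]
        exact Comp_step hr hj hRm hCr hPQ h1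
          (Or.inl ⟨rfl, by rw [(h1.2 r j0 hr hj).2 hP0, Dn_last m Rn r j0 hlast]⟩)
      · have hlt : r + 1 < Rn := by omega
        have : (r : Int) < R - 1 := by rw [hRv]; omega
        simp only [if_pos this]
        have hc : (r : Int) + 1 = ((r + 1 : Nat) : Int) := by push_cast; ring
        rw [hc, mset_nat, mget_nat, mget_nat]
        have hval : gN br.1 r j0 + gN br.1 (r + 1) j0 = Dn m Rn r j0 := by
          rw [(h1.2 r j0 hr hj).2 hP0,
            (h1.2 (r + 1) j0 hlt hj).1 (by unfold P2; omega),
            Dn_succ m Rn r j0 hlt h0]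
        rw [hval]
        exact Comp_step hr hj hRm hCr hPQ h1 (Or.inr rfl)
    · -- right component
      by_cases hlast : j0 + 1 = Cn
      · have : ¬ ((j0 : Int) < C - 1) := by rw [hCv]; omega
        simp only [if_neg this]
        exact Comp_step hr hj hRm hCr hPQ h2
          (Or.inl ⟨rfl, by rw [(h2.2 r j0 hr hj).2 hP0, Rt_last m Cn r j0 hlast]⟩)
      · have hlt : j0 + 1 < Cn := by omega
        have : (j0 : Int) < C - 1 := by rw [hCv]; omega
        simp only [if_pos this]
        have hc : (j0 : Int) + 1 = ((j0 + 1 : Nat) : Int) := by push_cast; ring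
        rw [hc, mset_nat, mget_nat, mget_nat]
        have hval : gN br.2 r j0 + gN br.2 r (j0 + 1) = Rt m Cn r j0 := by
          rw [(h2.2 r j0 hr hj).2 hP0,
            (h2.2 r (j0 + 1) hr hlt).1 (by unfold P2; omega),
            Rt_succ m Cn r j0 hlt h0]
        rw [hval]
        exact Comp_step hr hj hRm hCr hPQ h2 (Or.inr rfl)

lemma foldl_of_id {α : Type} {f : Int → α → Int} (hf : ∀ s x, f s x = s) :
    ∀ (l : List α) (s : Int), l.foldl f s = s := by
  intro l
  induction l with
  | nil => intro s; rfl
  | cons x t ih => intro s; rw [List.foldl_cons, hf]; exact ih s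

lemma pyRange_zero_list (C : Int) (Cn : Nat) (h : C = (Cn : Int)) :
    PySem.List.pyRange 0 C 1 = (List.range' 0 Cn).map (fun k : Nat => (k : Int)) := by
  rw [PySem.List.pyRange_one]
  subst h
  simp [List.range_eq_range']

lemma pyRange_down_list (R : Int) (Rn : Nat) (h : R = (Rn : Int)) :
    PySem.List.pyRange (R - 1) (-1) (-1) = ((List.range Rn).map (fun k : Nat => (k : Int))).reverse := by
  rw [PySem.List.pyRange_neg_one_eq_reverse]
  have h1 : (-1 : Int) + 1 = 0 := by ring
  have h2 : (R - 1) + 1 = R := by ring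
  rw [h1, h2, PySem.List.pyRange_one]
  subst h
  simp

lemma inner1 (m : List (List Int)) (Rn Cn : Nat)
    (hRm : Rn ≤ m.length) (hC : ∀ a, a < Rn → Cn ≤ (m.getD a []).length)
    (r : Nat) (hr : r < Rn) :
    ∀ (n j0 : Nat) (tl : List (List Int) × List (List Int)), j0 + n ≤ Cn →
      Comp m Rn Cn (U m) (P1 r j0) tl.1 → Comp m Rn Cn (Lf m) (P1 r j0) tl.2 →
      Comp m Rn Cn (U m) (P1 r (j0 + n))
          (((List.range' j0 n).map (fun k : Nat => (k : Int))).foldl (body1 m (r : Int)) tl).1 ∧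
      Comp m Rn Cn (Lf m) (P1 r (j0 + n))
          (((List.range' j0 n).map (fun k : Nat => (k : Int))).foldl (body1 m (r : Int)) tl).2 := by
  intro n
  induction n with
  | zero => intro j0 tl _ h1 h2; simpa using ⟨h1, h2⟩
  | succ n ih =>
    intro j0 tl hle h1 h2
    rw [List.range'_succ, List.map_cons, List.foldl_cons]
    obtain ⟨h1', h2'⟩ := step1 m Rn Cn hRm hC r j0 hr (by omega) tl h1 h2
    have hc : j0 + (n + 1) = (j0 + 1) + n := by omega
    rw [hc]
    exact ih (j0 + 1) _ (by omega) h1' h2'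

lemma outer1 (m : List (List Int)) (C : Int) (Rn Cn : Nat) (hCv : C = (Cn : Int))
    (hRm : Rn ≤ m.length) (hC : ∀ a, a < Rn → Cn ≤ (m.getD a []).length) :
    ∀ (n r : Nat) (tl : List (List Int) × List (List Int)), r + n ≤ Rn →
      Comp m Rn Cn (U m) (P1 r 0) tl.1 → Comp m Rn Cn (Lf m) (P1 r 0) tl.2 →
      Comp m Rn Cn (U m) (P1 (r + n) 0)
          (((List.range' r n).map (fun k : Nat => (k : Int))).foldl (row1 m C) tl).1 ∧
      Comp m Rn Cn (Lf m) (P1 (r + n) 0)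
          (((List.range' r n).map (fun k : Nat => (k : Int))).foldl (row1 m C) tl).2 := by
  intro n
  induction n with
  | zero => intro r tl _ h1 h2; simpa using ⟨h1, h2⟩
  | succ n ih =>
    intro r tl hle h1 h2
    rw [List.range'_succ, List.map_cons, List.foldl_cons]
    have hrow : row1 m C tl (r : Int) =
        ((List.range' 0 Cn).map (fun k : Nat => (k : Int))).foldl (body1 m (r : Int)) tl := by
      rw [row1, pyRange_zero_list C Cn hCv]
    obtain ⟨h1', h2'⟩ := inner1 m Rn Cn hRm hC r (by omega) Cn 0 tl (by omega) h1 h2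
    rw [← hrow] at h1' h2'
    have hmono : ∀ a b, a < Rn → b < Cn → (P1 (r + 1) 0 a b ↔ P1 r (0 + Cn) a b) := by
      intro a b _ hb; unfold P1; omega
    have hc : r + (n + 1) = (r + 1) + n := by omega
    rw [hc]
    exact ih (r + 1) _ (by omega) (Comp_mono hmono h1') (Comp_mono hmono h2')

lemma inner2 (m : List (List Int)) (R C : Int) (Rn Cn : Nat)
    (hRv : R = (Rn : Int)) (hCv : C = (Cn : Int))
    (hRm : Rn ≤ m.length) (hC : ∀ a, a < Rn → Cn ≤ (m.getD a []).length)
    (r : Nat) (hr : r < Rn) :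
    ∀ (j0 : Nat) (br : List (List Int) × List (List Int)), j0 ≤ Cn →
      Comp m Rn Cn (Dn m Rn) (P2 r j0) br.1 → Comp m Rn Cn (Rt m Cn) (P2 r j0) br.2 →
      Comp m Rn Cn (Dn m Rn) (P2 r 0)
          ((((List.range j0).map (fun k : Nat => (k : Int))).reverse).foldl (body2 m R C (r : Int)) br).1 ∧
      Comp m Rn Cn (Rt m Cn) (P2 r 0)
          ((((List.range j0).map (fun k : Nat => (k : Int))).reverse).foldl (body2 m R C (r : Int)) br).2 := by
  intro j0
  induction j0 with
  | zero => intro br _ h1 h2; simpa using ⟨h1, h2⟩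
  | succ j0 ih =>
    intro br hle h1 h2
    have hlist : (((List.range (j0 + 1)).map (fun k : Nat => (k : Int))).reverse)
        = (j0 : Int) :: ((List.range j0).map (fun k : Nat => (k : Int))).reverse := by
      simp [List.range_succ]
    rw [hlist, List.foldl_cons]
    obtain ⟨h1', h2'⟩ := step2 m R C Rn Cn hRv hCv hRm hC r j0 hr (by omega) br h1 h2
    exact ih _ (by omega) h1' h2'

lemma outer2 (m : List (List Int)) (R C : Int) (Rn Cn : Nat)
    (hRv : R = (Rn : Int)) (hCv : C = (Cn : Int))
    (hRm : Rn ≤ m.length) (hC : ∀ a, a < Rn → Cn ≤ (m.getD a []).length) :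
    ∀ (r : Nat) (br : List (List Int) × List (List Int)), r ≤ Rn →
      Comp m Rn Cn (Dn m Rn) (P2 r 0) br.1 → Comp m Rn Cn (Rt m Cn) (P2 r 0) br.2 →
      Comp m Rn Cn (Dn m Rn) (P2 0 0)
          ((((List.range r).map (fun k : Nat => (k : Int))).reverse).foldl (row2 m R C) br).1 ∧
      Comp m Rn Cn (Rt m Cn) (P2 0 0)
          ((((List.range r).map (fun k : Nat => (k : Int))).reverse).foldl (row2 m R C) br).2 := by
  intro r
  induction r with
  | zero => intro br _ h1 h2; simpa using ⟨h1, h2⟩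
  | succ r ih =>
    intro br hle h1 h2
    have hlist : (((List.range (r + 1)).map (fun k : Nat => (k : Int))).reverse)
        = (r : Int) :: ((List.range r).map (fun k : Nat => (k : Int))).reverse := by
      simp [List.range_succ]
    rw [hlist, List.foldl_cons]
    have hmono : ∀ a b, a < Rn → b < Cn → (P2 r Cn a b ↔ P2 (r + 1) 0 a b) := by
      intro a b _ hb; unfold P2; omega
    have hrow : row2 m R C br (r : Int) =
        ((((List.range Cn).map (fun k : Nat => (k : Int))).reverse)).foldl (body2 m R C (r : Int)) br := by
      rw [row2]
      have : C - 1 = (C - 1) := rfl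
      rw [show PySem.List.pyRange (C - 1) (-1) (-1)
            = ((List.range Cn).map (fun k : Nat => (k : Int))).reverse from pyRange_down_list C Cn hCv]
    obtain ⟨h1', h2'⟩ := inner2 m R C Rn Cn hRv hCv hRm hC r (by omega) Cn br (by omega)
      (Comp_mono hmono h1) (Comp_mono hmono h2)
    rw [← hrow] at h1' h2'
    exact ih _ (by omega) h1' h2'

lemma cell_eq (m : List (List Int)) (R C : Int) (Rn Cn : Nat)
    (hRv : R = (Rn : Int)) (hCv : C = (Cn : Int))
    (top left bottom right : List (List Int))
    (htop : ∀ a b, a < Rn → b < Cn → gN top a b = U m a b)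
    (hleft : ∀ a b, a < Rn → b < Cn → gN left a b = Lf m a b)
    (hbot : ∀ a b, a < Rn → b < Cn → gN bottom a b = Dn m Rn a b)
    (hrt : ∀ a b, a < Rn → b < Cn → gN right a b = Rt m Cn a b)
    (a b : Nat) (ha : a < Rn) (hb : b < Cn) (res : Int) :
    body3 m top left bottom right (a : Int) res (b : Int) = bodyB R C m (a : Int) res (b : Int) := by
  rw [body3, bodyB]
  simp only [mget_nat]
  by_cases h0 : gN m a b = 0
  · rw [if_pos h0, if_pos h0]
  · rw [if_neg h0, if_neg h0]
    have e1 : ((a : Int) + 1).toNat = a + 1 := by omega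
    have e2 : (R - (a : Int)).toNat = Rn - a := by omega
    have e3 : ((b : Int) + 1).toNat = b + 1 := by omega
    have e4 : (C - (b : Int)).toNat = Cn - b := by omega
    have e5 : PySem.List.pyGetD m (a : Int) [] = m.getD a [] := by simp
    simp only [e1, e2, e3, e4, e5]
    rw [htop a b ha hb, hleft a b ha hb, hbot a b ha hb, hrt a b ha hb]
    rfl

-- ===== VERDICT (by name: the statement is the Claim_ definition above) =====
theorem solution_optimal_spec : Claim_equal_solution_optimal := by
  intro R C m _ hpre
  unfold Spec_solution_optimal
  by_cases hR0 : R ≤ 0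
  · simp [solution_optimal, solution_optimal_alt, PySem.List.pyRange_one_eq_nil hR0]
  by_cases hC0 : C ≤ 0
  · have hnil := PySem.List.pyRange_one_eq_nil hC0
    simp only [solution_optimal, solution_optimal_alt]
    rw [foldl_of_id (f := rowB R C m) (fun s x => by simp [rowB, hnil]),
      foldl_of_id (fun s x => by simp [row3, hnil])]
  -- main case: both loop ranges nonempty, so Pre_ gives the shape facts
  have hpre' : R ≤ (m.length : Int) ∧ ∀ row ∈ m.take R.toNat, C ≤ (row.length : Int) := by
    rcases hpre with h | h | h
    · omega
    · omega
    · exact h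
  obtain ⟨hlen, hrows⟩ := hpre'
  have hRv : R = (R.toNat : Int) := by omega
  have hCv : C = (C.toNat : Int) := by omega
  have hRm : R.toNat ≤ m.length := by omega
  have hC : ∀ a, a < R.toNat → C.toNat ≤ (m.getD a []).length := by
    intro a ha
    have halen : a < m.length := by omega
    have hmem : m.getD a [] ∈ m.take R.toNat := by
      rw [List.getD_eq_getElem?_getD, List.getElem?_eq_getElem halen, Option.getD_some]
      have : (m.take R.toNat)[a]'(by simp; omega) = m[a] := List.getElem_take
      rw [← this]
      exact List.getElem_mem _
    have := hrows _ hmem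
    omega
  have hinit1 : Comp m R.toNat C.toNat (U m) (P1 0 0) m ∧
      Comp m R.toNat C.toNat (Lf m) (P1 0 0) m := by
    constructor <;>
      exact ⟨rfl, fun a b _ _ => ⟨fun hp => absurd hp (by unfold P1; omega), fun _ => rfl⟩⟩
  have hinit2 : Comp m R.toNat C.toNat (Dn m R.toNat) (P2 R.toNat 0) m ∧
      Comp m R.toNat C.toNat (Rt m C.toNat) (P2 R.toNat 0) m := by
    constructor <;>
      refine ⟨rfl, fun a b ha _ => ⟨fun hp => absurd hp (by unfold P2; omega), fun _ => rfl⟩⟩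
  simp only [solution_optimal, solution_optimal_alt, List.map_id']
  obtain ⟨h1, h2⟩ := by
    refine outer1 m C R.toNat C.toNat hCv hRm hC R.toNat 0 (m, m) (by omega) hinit1.1 hinit1.2
  obtain ⟨h3, h4⟩ := by
    refine outer2 m R C R.toNat C.toNat hRv hCv hRm hC R.toNat (m, m) (by omega) hinit2.1 hinit2.2
  rw [show PySem.List.pyRange 0 R 1 = (List.range' 0 R.toNat).map (fun k : Nat => (k : Int)) from
      pyRange_zero_list R R.toNat hRv]
  rw [show PySem.List.pyRange (R - 1) (-1) (-1)
      = ((List.range R.toNat).map (fun k : Nat => (k : Int))).reverse from pyRange_down_list R R.toNat hRv]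
  apply PySem.List.foldl_congr_mem
  intro acc x hx
  obtain ⟨a, rfl, ha⟩ : ∃ a : Nat, x = (a : Int) ∧ a < R.toNat := by
    simp only [List.mem_map, List.mem_range'] at hx
    obtain ⟨k, hk, rfl⟩ := hx
    exact ⟨k, rfl, by omega⟩
  rw [row3, rowB, pyRange_zero_list C C.toNat hCv]
  apply PySem.List.foldl_congr_mem
  intro acc2 y hy
  obtain ⟨b, rfl, hb⟩ : ∃ b : Nat, y = (b : Int) ∧ b < C.toNat := by
    simp only [List.mem_map, List.mem_range'] at hy
    obtain ⟨k, hk, rfl⟩ := hy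
    exact ⟨k, rfl, by omega⟩
  apply cell_eq m R C R.toNat C.toNat hRv hCv _ _ _ _
    (fun a b ha hb => (h1.2 a b ha hb).1 (by unfold P1; omega))
    (fun a b ha hb => (h2.2 a b ha hb).1 (by unfold P1; omega))
    (fun a b ha hb => (h3.2 a b ha hb).1 (by unfold P2; omega))
    (fun a b ha hb => (h4.2 a b ha hb).1 (by unfold P2; omega))
    a b ha hb
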